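-- pv_equiv track=rewrite | github.com/armancher/bootkamp_dasgarmi | balin.py | calculate_floor
-- ===== SOURCE A (Python) =====
-- def calculate_floor(string):
--     counter=0
--     for i in string:
--         if i=='U':
--             counter +=1
--         elif i=='D':
--             counter -=1
--     return min(max(counter,-4),4)
-- ===== SOURCE B (Python) =====
-- def calculate_floor(string):
--     def net(s):
--         if len(s) == 0:
--             return 0
--         if len(s) == 1:
--             return 1 if s == 'U' else (-1 if s == 'D' else 0)
--         m = len(s) // 2
--         return net(s[:m]) + net(s[m:])
--     n = net(string)
--     return -4 if n < -4 else (4 if n > 4 else n)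
-- ===== Notes on version B (the rewrite author's own statement) =====
-- stated objective: alternative
-- what changed: Replaces the single left-to-right accumulating loop with a divide-and-conquer recursion that halves the string, sums the nets of the two halves, and clamps with an explicit conditional chain instead of min/max.
import Mathlib
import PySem

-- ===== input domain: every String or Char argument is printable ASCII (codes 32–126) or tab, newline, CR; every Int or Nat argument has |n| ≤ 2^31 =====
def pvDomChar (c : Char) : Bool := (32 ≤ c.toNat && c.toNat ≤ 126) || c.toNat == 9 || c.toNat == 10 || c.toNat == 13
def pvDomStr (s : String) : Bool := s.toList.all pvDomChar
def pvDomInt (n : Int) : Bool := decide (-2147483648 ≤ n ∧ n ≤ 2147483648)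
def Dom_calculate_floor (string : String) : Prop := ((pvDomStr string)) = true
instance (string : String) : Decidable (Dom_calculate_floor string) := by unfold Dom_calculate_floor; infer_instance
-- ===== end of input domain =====

-- B computes the net tally by a divide-and-conquer recursion on halves and clamps with a conditional chain (alternative decomposition).

-- ===== PORT A =====
def calculate_floor (string : String) : Int :=
  let counter : Int :=
    string.toList.foldl
      (fun counter i =>
        if i == 'U' then counter + 1
        else if i == 'D' then counter - 1
        else counter) 0
  min (max counter (-4)) 4

-- ===== PORT B =====
-- net(s): 0 for empty, table for a single char, split in half otherwise
def pvNet (s : List Char) : Int :=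
  if s.length = 0 then 0
  else if s.length = 1 then
    (if s == ['U'] then 1 else if s == ['D'] then -1 else 0)
  else
    let m := s.length / 2
    pvNet (s.take m) + pvNet (s.drop m)
termination_by s.length
decreasing_by
  · simpa [List.length_take] using by omega
  · simp [List.length_drop]; omega

def calculate_floor_alt (string : String) : Int :=
  let n := pvNet string.toList
  if n < -4 then -4 else if n > 4 then 4 else n

-- ===== PRECONDITION & SPEC =====
def Spec_calculate_floor (string : String) (out : Int) : Prop := out = calculate_floor_alt string
instance (string : String) (out : Int) : Decidable (Spec_calculate_floor string out) := by unfold Spec_calculate_floor; infer_instance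

-- ===== CLAIM (what is proved, stated in full; the proofs are below) =====
def Claim_equal_calculate_floor : Prop := ∀ (string : String), Dom_calculate_floor string → Spec_calculate_floor string (calculate_floor string)

-- ===== LEMMAS AND PROOFS =====

-- A's loop accumulator equals count 'U' minus count 'D'.
theorem foldl_ud (l : List Char) (a : Int) :
    l.foldl (fun counter i =>
        if i == 'U' then counter + 1
        else if i == 'D' then counter - 1
        else counter) a
      = a + (l.count 'U' : Int) - (l.count 'D' : Int) := by
  induction l generalizing a with
  | nil => simp
  | cons x t ih =>
    simp only [List.foldl_cons, ih, List.count_cons]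
    by_cases h1 : x = 'U'
    · simp [h1]; omega
    · by_cases h2 : x = 'D'
      · simp [h2]; omega
      · simp [h1, h2]

-- B's divide-and-conquer net equals count 'U' minus count 'D'.
theorem pvNet_eq (s : List Char) : pvNet s = (s.count 'U' : Int) - (s.count 'D' : Int) := by
  fun_induction pvNet s with
  | case1 s h0 =>
    have : s = [] := List.length_eq_zero_iff.mp h0
    subst this; simp
  | case2 s h0 h1 hU =>
    have : s = ['U'] := by simpa using hU
    subst this; simp
  | case3 s h0 h1 hU hD =>
    have : s = ['D'] := by simpa using hD
    subst this; simp
  | case4 s h0 h1 hU hD =>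
    obtain ⟨c, rfl⟩ := List.length_eq_one_iff.mp h1
    have hU' : c ≠ 'U' := by intro h; exact hU (by simp [h])
    have hD' : c ≠ 'D' := by intro h; exact hD (by simp [h])
    simp [List.count_cons, hU', hD']
  | case5 s h0 h1 m ih1 ih2 =>
    have h := List.take_append_drop m s
    rw [ih1, ih2]
    conv_rhs => rw [← h]
    simp only [List.count_append]
    push_cast; ring

-- ===== VERDICT (by name: the statement is the Claim_ definition above) =====
theorem calculate_floor_spec : Claim_equal_calculate_floor := by
  intro s _
  unfold Spec_calculate_floor calculate_floor calculate_floor_alt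
  simp only [foldl_ud, pvNet_eq]
  omega
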